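-- pv_equiv track=rewrite | github.com/czmmiao/LearnPython | Algorithms/DP/splitTwoNumber2Array.py | SplitSumClosedSizeHalf2
-- ===== SOURCE A (Python) =====
-- from typing import List
--
-- def SplitSumClosedSizeHalf2(arr: List) -> int:
--
--     rest = sum(arr)//2
--     N = len(arr)
--     M = -(-N//2)
--
--     dp = [[[-1]*(M + 1) for _ in range(rest + 1)] for _ in range(N + 1)]
--
--
--     for r in range(rest + 1):
--         dp[N][r][0] = 0
--
--     for n in range(N-1, -1, -1):
--         for r in range(rest + 1):
--             for m in range(M + 1):
--                 p1 = dp[n+1][r][m]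
--                 p2 = -1
--                 if r >= arr[n] and m-1>=0:
--                     next = dp[n+1][r-arr[n]][m-1]
--                     if next != -1:
--                         p2 = next + arr[n]
--                 dp[n][r][m] = max(p1, p2)
--
--     if N % 2 == 0:
--         return dp[0][rest][N//2]
--     elif N % 2 == 1:
--         return max(dp[0][rest][N//2],
--                    dp[0][rest][N//2 + 1])
-- ===== SOURCE B (Python) =====
-- from typing import List
--
-- def SplitSumClosedSizeHalf2(arr: List) -> int:
--     rest = sum(arr) // 2
--     N = len(arr)
--     M = (N + 1) // 2
--     # reach[m] = set of exact sums <= rest achievable by choosing exactly m items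
--     reach = [{0}] + [set() for _ in range(M)]
--     for a in arr:
--         reach = [reach[0]] + [reach[m] | {s + a for s in reach[m - 1] if s + a <= rest}
--                               for m in range(1, M + 1)]
--     half = N // 2
--     cands = reach[half] if N % 2 == 0 else reach[half] | reach[half + 1]
--     return max(cands, default=-1)
-- ===== Notes on version B (the rewrite author's own statement) =====
-- stated objective: alternative
-- what changed: Replaces A's backward 3-D max-value table dp[n][r][m] (filled for every budget r in 0..rest) by a forward one-pass DP over the items that keeps, per chosen-count m, the set of exactly-achievable subset sums that are <= rest, returning the max of the relevant set(s).
-- outside the precondition, e.g. on SplitSumClosedSizeHalf2([-1, 2]): A raises IndexError, B returns -1; on SplitSumClosedSizeHalf2([-3]): A raises IndexError, B returns 0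
import Mathlib
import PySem

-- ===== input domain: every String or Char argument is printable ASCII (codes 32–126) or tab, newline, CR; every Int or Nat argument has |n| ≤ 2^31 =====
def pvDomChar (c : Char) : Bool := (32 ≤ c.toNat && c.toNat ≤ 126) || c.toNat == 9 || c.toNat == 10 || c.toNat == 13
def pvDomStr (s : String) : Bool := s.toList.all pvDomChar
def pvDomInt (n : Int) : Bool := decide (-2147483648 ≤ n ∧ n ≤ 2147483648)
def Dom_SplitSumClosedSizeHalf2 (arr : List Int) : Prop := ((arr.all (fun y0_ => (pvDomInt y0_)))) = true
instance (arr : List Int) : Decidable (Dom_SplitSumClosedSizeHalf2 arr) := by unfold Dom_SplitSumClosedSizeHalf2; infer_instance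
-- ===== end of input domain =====

-- B replaces A's backward 3-D max-table DP by a forward reachable-set DP over prefixes
-- (one set of achievable exact sums per chosen-count); objective: alternative algorithm.

-- ===== PORT A =====
-- helper: the body of A's 'for n' loop — builds dp[n] (a (rest+1) × (M+1) row) from dp[n+1]
def pvARow (rest M a : Int) (dpn1 : List (List Int)) : List (List Int) :=
  (PySem.List.pyRange 0 (rest + 1) 1).map (fun r =>
    (PySem.List.pyRange 0 (M + 1) 1).map (fun m =>
      let p1 := PySem.List.pyGetD (PySem.List.pyGetD dpn1 r []) m (-1)
      let p2 : Int :=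
        if a ≤ r ∧ 0 ≤ m - 1 then
          let nxt := PySem.List.pyGetD (PySem.List.pyGetD dpn1 (r - a) []) (m - 1) (-1)
          if nxt ≠ -1 then nxt + a else -1
        else -1
      max p1 p2))

def SplitSumClosedSizeHalf2 (arr : List Int) : Int :=
  let rest : Int := PySem.Int.floordiv arr.sum 2
  let N : Int := (arr.length : Int)
  let M : Int := -(PySem.Int.floordiv (-N) 2)
  -- dp[N]: each row is [-1]*(M+1), then the loop 'for r in range(rest+1): dp[N][r][0] = 0'
  let dpN : List (List Int) :=
    (PySem.List.pyRange 0 (rest + 1) 1).map (fun _ =>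
      PySem.List.pySetD (List.replicate (M + 1).toNat (-1)) 0 0)
  let dp0 : List (List Int) :=
    (PySem.List.pyRange (N - 1) (-1) (-1)).foldl
      (fun dpn1 n => pvARow rest M (PySem.List.pyGetD arr n 0) dpn1) dpN
  if PySem.Int.mod N 2 = 0 then
    PySem.List.pyGetD (PySem.List.pyGetD dp0 rest []) (PySem.Int.floordiv N 2) (-1)
  else
    max (PySem.List.pyGetD (PySem.List.pyGetD dp0 rest []) (PySem.Int.floordiv N 2) (-1))
        (PySem.List.pyGetD (PySem.List.pyGetD dp0 rest []) (PySem.Int.floordiv N 2 + 1) (-1))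

-- ===== PORT B =====
-- helper: the body of B's 'for a in arr' loop — one forward step of the reachable-set DP
def pvBStep (rest M : Int) (reach : List (PySem.Set Int)) (a : Int) : List (PySem.Set Int) :=
  [PySem.List.pyGetD reach 0 []] ++
    (PySem.List.pyRange 1 (M + 1) 1).map (fun m =>
      PySem.Set.union (PySem.List.pyGetD reach m [])
        (PySem.Set.ofList
          (((PySem.List.pyGetD reach (m - 1) []).filter (fun s => decide (s + a ≤ rest))).map
            (fun s => s + a))))

def SplitSumClosedSizeHalf2_alt (arr : List Int) : Int :=
  let rest : Int := PySem.Int.floordiv arr.sum 2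
  let N : Int := (arr.length : Int)
  let M : Int := PySem.Int.floordiv (N + 1) 2
  let reach0 : List (PySem.Set Int) :=
    [PySem.Set.ofList [0]] ++
      (PySem.List.pyRange 0 M 1).map (fun _ => (PySem.Set.empty : PySem.Set Int))
  let reach : List (PySem.Set Int) := arr.foldl (pvBStep rest M) reach0
  let half : Int := PySem.Int.floordiv N 2
  let cands : PySem.Set Int :=
    if PySem.Int.mod N 2 = 0 then PySem.List.pyGetD reach half []
    else PySem.Set.union (PySem.List.pyGetD reach half []) (PySem.List.pyGetD reach (half + 1) [])
  (PySem.List.max? cands (fun x => x)).getD (-1)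

-- ===== PRECONDITION & SPEC =====
-- Pre_ excludes inputs containing a negative element: on every such input the Python A
-- raises IndexError (a negative total makes the dp rows empty, or dp[n+1][r-arr[n]]
-- indexes past the end of a row), so A returns no value there.
def Pre_SplitSumClosedSizeHalf2 (arr : List Int) : Prop := ∀ x ∈ arr, 0 ≤ x
instance (arr : List Int) : Decidable (Pre_SplitSumClosedSizeHalf2 arr) := by
  unfold Pre_SplitSumClosedSizeHalf2; infer_instance
def pvWitness_SplitSumClosedSizeHalf2 : List Int := [1, 2, 3]

def Spec_SplitSumClosedSizeHalf2 (arr : List Int) (out : Int) : Prop := out = SplitSumClosedSizeHalf2_alt arr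
instance (arr : List Int) (out : Int) : Decidable (Spec_SplitSumClosedSizeHalf2 arr out) := by unfold Spec_SplitSumClosedSizeHalf2; infer_instance

-- ===== CLAIM (what is proved, stated in full; the proofs are below) =====
def Claim_equal_SplitSumClosedSizeHalf2 : Prop := ∀ (arr : List Int), Dom_SplitSumClosedSizeHalf2 arr → Pre_SplitSumClosedSizeHalf2 arr → Spec_SplitSumClosedSizeHalf2 arr (SplitSumClosedSizeHalf2 arr)

-- ===== LEMMAS AND PROOFS =====

-- 'exactly m items chosen from l with total s' (m, s as Python ints)
def Ach (l : List Int) (m s : Int) : Prop :=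
  ∃ t : List Int, t.Sublist l ∧ (t.length : Int) = m ∧ t.sum = s

-- the mathematical content of A's dp: dp[n][r][m] = bestA (arr from n on) r m
def bestA : List Int → Int → Int → Int
  | [], _, m => if m = 0 then 0 else -1
  | a :: l, r, m =>
    max (bestA l r m)
      (if a ≤ r ∧ 0 ≤ m - 1 then
        (if bestA l (r - a) (m - 1) ≠ -1 then bestA l (r - a) (m - 1) + a else -1)
       else -1)

theorem sublist_sum_nonneg {l t : List Int} (nn : ∀ x ∈ l, 0 ≤ x) (h : t.Sublist l) :
    0 ≤ t.sum :=
  List.sum_nonneg (fun x hx => nn x (h.subset hx))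

theorem ach_nil {m s : Int} : Ach [] m s ↔ m = 0 ∧ s = 0 := by
  constructor
  · rintro ⟨t, ht, hlen, hsum⟩
    rw [List.sublist_nil] at ht
    subst ht; simp at hlen hsum; omega
  · rintro ⟨hm, hs⟩
    exact ⟨[], List.nil_sublist _, by simp [hm], by simp [hs]⟩

theorem ach_cons {a : Int} {l : List Int} {m s : Int} :
    Ach (a :: l) m s ↔ Ach l m s ∨ Ach l (m - 1) (s - a) := by
  constructor
  · rintro ⟨t, ht, hlen, hsum⟩
    rcases List.sublist_cons_iff.mp ht with h | ⟨r, rfl, hr⟩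
    · exact Or.inl ⟨t, h, hlen, hsum⟩
    · refine Or.inr ⟨r, hr, ?_, ?_⟩
      · simp at hlen; omega
      · simp at hsum; omega
  · rintro (⟨t, ht, hlen, hsum⟩ | ⟨t, ht, hlen, hsum⟩)
    · exact ⟨t, ht.cons a, hlen, hsum⟩
    · exact ⟨a :: t, ht.cons₂ a, by rw [List.length_cons]; push_cast; omega, by simp; omega⟩

theorem ach_append_singleton {a : Int} {l : List Int} {m s : Int} :
    Ach (l ++ [a]) m s ↔ Ach l m s ∨ Ach l (m - 1) (s - a) := by
  constructor
  · rintro ⟨t, ht, hlen, hsum⟩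
    rcases List.sublist_append_iff.mp ht with ⟨t1, t2, rfl, h1, h2⟩
    rcases List.sublist_singleton.mp h2 with rfl | rfl
    · exact Or.inl ⟨t1, h1, by simpa using hlen, by simpa using hsum⟩
    · refine Or.inr ⟨t1, h1, ?_, ?_⟩
      · simp at hlen; omega
      · simp at hsum; omega
  · rintro (⟨t, ht, hlen, hsum⟩ | ⟨t, ht, hlen, hsum⟩)
    · exact ⟨t, ht.trans (List.sublist_append_left l [a]), hlen, hsum⟩
    · exact ⟨t ++ [a], ht.append (List.Sublist.refl [a]), by simp; omega,
        by simp; omega⟩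

theorem ach_nonneg {l : List Int} {m s : Int} (nn : ∀ x ∈ l, 0 ≤ x) (h : Ach l m s) :
    0 ≤ s := by
  rcases h with ⟨t, ht, -, rfl⟩
  exact sublist_sum_nonneg nn ht

theorem ach_len_nonneg {l : List Int} {m s : Int} (h : Ach l m s) : 0 ≤ m := by
  rcases h with ⟨t, -, rfl, -⟩
  positivity

theorem bestA_ub {l : List Int} (nn : ∀ x ∈ l, 0 ≤ x) :
    ∀ {r m s : Int}, Ach l m s → s ≤ r → s ≤ bestA l r m := by
  induction l with
  | nil =>
    intro r m s h hle
    rcases ach_nil.mp h with ⟨rfl, rfl⟩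
    simp [bestA]
  | cons a l ih =>
    intro r m s h hle
    have nnl : ∀ x ∈ l, 0 ≤ x := fun x hx => nn x (List.mem_cons_of_mem a hx)
    have ha : 0 ≤ a := nn a List.mem_cons_self
    rcases ach_cons.mp h with h | h
    · exact le_trans (ih nnl h hle) (by simp [bestA])
    · have hs : 0 ≤ s - a := ach_nonneg nnl h
      have hm : 0 ≤ m - 1 := ach_len_nonneg h
      have h1 : s - a ≤ bestA l (r - a) (m - 1) := ih nnl h (by omega)
      have hne : bestA l (r - a) (m - 1) ≠ -1 := by omega
      simp only [bestA]
      rw [if_pos ⟨by omega, hm⟩, if_pos hne]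
      have : s ≤ bestA l (r - a) (m - 1) + a := by omega
      exact le_trans this (le_max_right _ _)

theorem bestA_mem {l : List Int} (nn : ∀ x ∈ l, 0 ≤ x) :
    ∀ {r m : Int}, 0 ≤ r → bestA l r m ≠ -1 → Ach l m (bestA l r m) ∧ bestA l r m ≤ r := by
  induction l with
  | nil =>
    intro r m hr hne
    by_cases hm : m = 0
    · subst hm
      simp [bestA] at hne ⊢
      exact ⟨ach_nil.mpr ⟨rfl, rfl⟩, hr⟩
    · simp [bestA, hm] at hne
  | cons a l ih =>
    intro r m hr hne
    have nnl : ∀ x ∈ l, 0 ≤ x := fun x hx => nn x (List.mem_cons_of_mem a hx)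
    simp only [bestA] at hne ⊢
    rcases max_choice (bestA l r m)
      (if a ≤ r ∧ 0 ≤ m - 1 then
        (if bestA l (r - a) (m - 1) ≠ -1 then bestA l (r - a) (m - 1) + a else -1)
       else -1) with hmax | hmax
    · rw [hmax] at hne ⊢
      obtain ⟨h1, h2⟩ := ih nnl hr hne
      exact ⟨ach_cons.mpr (Or.inl h1), h2⟩
    · rw [hmax] at hne ⊢
      split_ifs at hne ⊢ with hg hn
      · obtain ⟨h1, h2⟩ := ih nnl (show (0:Int) ≤ r - a by omega) hn
        refine ⟨ach_cons.mpr (Or.inr ?_), by omega⟩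
        simpa using h1
      · simp at hne
      · simp at hne

-- ---------- A side ----------

def RepA (rest M : Int) (l : List Int) (row : List (List Int)) : Prop :=
  ∀ r m : Int, 0 ≤ r → r ≤ rest → 0 ≤ m → m ≤ M →
    PySem.List.pyGetD (PySem.List.pyGetD row r []) m (-1) = bestA l r m

theorem pyGetD_cons_of_pos {α : Type} (x : α) (t : List α) (k : Int) (d : α) (hk : 1 ≤ k) :
    PySem.List.pyGetD (x :: t) k d = PySem.List.pyGetD t (k - 1) d := by
  unfold PySem.List.pyGetD
  rw [PySem.List.pyGet?_of_nonneg _ (by omega), PySem.List.pyGet?_of_nonneg _ (by omega),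
    show k.toNat = (k - 1).toNat + 1 by omega]
  simp

theorem repA_base {rest M : Int} (hM : 0 ≤ M) :
    RepA rest M []
      ((PySem.List.pyRange 0 (rest + 1) 1).map (fun _ =>
        PySem.List.pySetD (List.replicate (M + 1).toNat (-1)) 0 0)) := by
  intro r m hr hrle hm hmle
  rw [PySem.List.pyGetD_map_pyRange_of_nonneg _ _ _ _ hr (by omega)]
  have hrow : PySem.List.pySetD (List.replicate (M+1).toNat (-1 : Int)) 0 0 =
      0 :: List.replicate M.toNat (-1) := by
    rw [show (M+1).toNat = M.toNat + 1 by omega]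
    simp [PySem.List.pySetD, PySem.List.pySet?, PySem.List.pyIdx?, List.replicate_succ]
  rw [hrow]
  by_cases h0 : m = 0
  · subst h0; rw [PySem.List.pyGetD_zero_cons]; simp [bestA]
  · rw [pyGetD_cons_of_pos _ _ _ _ (by omega)]
    rw [PySem.List.pyGetD_eq_getElem _ _ (by omega) (by simp; omega)]
    simp [bestA, h0]

theorem repA_step {rest M a : Int} {l : List Int} {row : List (List Int)}
    (ha : 0 ≤ a) (h : RepA rest M l row) :
    RepA rest M (a :: l) (pvARow rest M a row) := by
  intro r m hr hrle hm hmle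
  unfold pvARow
  rw [PySem.List.pyGetD_map_pyRange_of_nonneg _ _ _ _ hr (by omega)]
  rw [PySem.List.pyGetD_map_pyRange_of_nonneg _ _ _ _ hm (by omega)]
  simp only [bestA]
  rw [h r m hr hrle hm hmle]
  congr 1
  by_cases hg : a ≤ r ∧ 0 ≤ m - 1
  · rw [if_pos hg, if_pos hg, h (r - a) (m - 1) (by omega) (by omega) hg.2 (by omega)]
  · rw [if_neg hg, if_neg hg]

theorem repA_fold {rest M : Int} (arr : List Int) (nn : ∀ x ∈ arr, 0 ≤ x) :
    ∀ (k : Nat) (init : List (List Int)), k ≤ arr.length →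
      RepA rest M (arr.drop k) init →
      RepA rest M arr
        ((PySem.List.pyRange ((k : Int) - 1) (-1) (-1)).foldl
          (fun dpn1 n => pvARow rest M (PySem.List.pyGetD arr n 0) dpn1) init) := by
  intro k
  induction k with
  | zero =>
    intro init _ hinit
    rw [show ((0:Nat):Int) - 1 = (-1 : Int) by norm_num,
      PySem.List.pyRange_neg_one_eq_nil le_rfl]
    simpa using hinit
  | succ k ih =>
    intro init hk hinit
    rw [show ((k+1:Nat):Int) - 1 = (k:Int) by push_cast; ring,
      PySem.List.pyRange_neg_one_cons (by omega)]
    simp only [List.foldl_cons]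
    rw [show (k:Int) - 1 = ((k:Nat):Int) - 1 from rfl]
    have hklt : k < arr.length := by omega
    apply ih _ (by omega)
    rw [PySem.List.pyGetD_ofNat arr k 0 hklt]
    have hdrop : arr.drop k = arr[k] :: arr.drop (k + 1) := (List.getElem_cons_drop hklt).symm
    rw [hdrop]
    exact repA_step (nn _ (arr.getElem_mem hklt)) hinit

-- ---------- B side ----------

def InvB (rest M : Int) (l : List Int) (reach : List (PySem.Set Int)) : Prop :=
  ∀ k : Int, 0 ≤ k → k ≤ M → ∀ s : Int,
    s ∈ PySem.List.pyGetD reach k [] ↔ (Ach l k s ∧ s ≤ rest)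

theorem invB_init {rest M : Int} (hrest : 0 ≤ rest) :
    InvB rest M []
      ([PySem.Set.ofList [0]] ++
        (PySem.List.pyRange 0 M 1).map (fun _ => (PySem.Set.empty : PySem.Set Int))) := by
  intro k hk hkM s
  rw [List.singleton_append]
  by_cases h0 : k = 0
  · subst h0
    rw [PySem.List.pyGetD_zero_cons]
    simp [PySem.Set.mem_ofList, ach_nil]
    omega
  · rw [pyGetD_cons_of_pos _ _ _ _ (by omega)]
    rw [PySem.List.pyGetD_map_pyRange_of_nonneg _ _ _ _ (by omega) (by omega)]
    simp [PySem.Set.empty, ach_nil, h0]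

theorem invB_step {rest M a : Int} {l : List Int} {reach : List (PySem.Set Int)}
    (ha : 0 ≤ a) (h : InvB rest M l reach) :
    InvB rest M (l ++ [a]) (pvBStep rest M reach a) := by
  intro k hk hkM s
  unfold pvBStep
  rw [List.singleton_append]
  rw [ach_append_singleton]
  by_cases h0 : k = 0
  · subst h0
    rw [PySem.List.pyGetD_zero_cons, h 0 le_rfl hkM s]
    constructor
    · rintro ⟨h1, h2⟩; exact ⟨Or.inl h1, h2⟩
    · rintro ⟨h1 | h1, h2⟩
      · exact ⟨h1, h2⟩
      · exact absurd (ach_len_nonneg h1) (by omega)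
  · rw [pyGetD_cons_of_pos _ _ _ _ (by omega)]
    rw [show k - 1 = (((k-1).toNat : Nat) : Int) by omega]
    rw [PySem.List.pyGetD_map_pyRange_one _ _ _ _ _ (by omega)]
    rw [show (1 : Int) + ((k-1).toNat : Int) = k by omega]
    rw [show (((k-1).toNat : Nat) : Int) = k - 1 by omega]
    rw [PySem.Set.mem_union]
    rw [h k hk hkM s]
    rw [PySem.Set.mem_ofList]
    simp only [List.mem_map, List.mem_filter, decide_eq_true_eq]
    constructor
    · rintro (⟨h1, h2⟩ | ⟨s0, ⟨hs0, hle⟩, rfl⟩)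
      · exact ⟨Or.inl h1, h2⟩
      · rw [h (k - 1) (by omega) (by omega) s0] at hs0
        exact ⟨Or.inr (by rw [show s0 + a - a = s0 by ring]; exact hs0.1), hle⟩
    · rintro ⟨h1 | h1, h2⟩
      · exact Or.inl ⟨h1, h2⟩
      · refine Or.inr ⟨s - a, ⟨?_, by omega⟩, by omega⟩
        rw [h (k - 1) (by omega) (by omega) (s - a)]
        exact ⟨h1, by omega⟩

theorem invB_fold {rest M : Int} :
    ∀ (l2 l : List Int) (reach : List (PySem.Set Int)), (∀ x ∈ l2, 0 ≤ x) →
      InvB rest M l reach → InvB rest M (l ++ l2) (l2.foldl (pvBStep rest M) reach) := by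
  intro l2
  induction l2 with
  | nil => intro l reach _ h; simpa using h
  | cons a l2 ih =>
    intro l reach nn h
    rw [show l ++ a :: l2 = (l ++ [a]) ++ l2 by simp]
    simp only [List.foldl_cons]
    exact ih (l ++ [a]) _ (fun x hx => nn x (List.mem_cons_of_mem a hx))
      (invB_step (nn a List.mem_cons_self) h)

-- ---------- glue: max of an achievable-sum set = bestA ----------

theorem maxSet_eq_bestA2 {arr : List Int} {rest k1 k2 : Int} (nn : ∀ x ∈ arr, 0 ≤ x)
    (hrest : 0 ≤ rest) (S : List Int)
    (hS : ∀ s : Int, s ∈ S ↔ ((Ach arr k1 s ∨ Ach arr k2 s) ∧ s ≤ rest)) :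
    (PySem.List.max? S (fun x => x)).getD (-1) = max (bestA arr rest k1) (bestA arr rest k2) := by
  cases hmax : PySem.List.max? S (fun x => x) with
  | none =>
    have hempty : S = [] := (PySem.List.max?_eq_none_iff S _).mp hmax
    have h1 : bestA arr rest k1 = -1 := by
      by_contra hne
      obtain ⟨hach, hle⟩ := bestA_mem nn hrest hne
      have := (hS _).mpr ⟨Or.inl hach, hle⟩
      simp [hempty] at this
    have h2 : bestA arr rest k2 = -1 := by
      by_contra hne
      obtain ⟨hach, hle⟩ := bestA_mem nn hrest hne
      have := (hS _).mpr ⟨Or.inr hach, hle⟩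
      simp [hempty] at this
    simp [h1, h2]
  | some v =>
    have hvS : v ∈ S := PySem.List.max?_mem hmax
    obtain ⟨hach, hle⟩ := (hS v).mp hvS
    have hv0 : 0 ≤ v := by rcases hach with h | h <;> exact ach_nonneg nn h
    have hvle : v ≤ max (bestA arr rest k1) (bestA arr rest k2) := by
      rcases hach with h | h
      · exact le_trans (bestA_ub nn h hle) (le_max_left _ _)
      · exact le_trans (bestA_ub nn h hle) (le_max_right _ _)
    have hbv : max (bestA arr rest k1) (bestA arr rest k2) ≤ v := by
      rcases max_choice (bestA arr rest k1) (bestA arr rest k2) with hc | hc <;> rw [hc]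
      · have hne : bestA arr rest k1 ≠ -1 := by omega
        obtain ⟨h1, h2⟩ := bestA_mem nn hrest hne
        exact PySem.List.max?_isMax hmax _ ((hS _).mpr ⟨Or.inl h1, h2⟩)
      · have hne : bestA arr rest k2 ≠ -1 := by rw [← hc] at hvle ⊢; omega
        obtain ⟨h1, h2⟩ := bestA_mem nn hrest hne
        exact PySem.List.max?_isMax hmax _ ((hS _).mpr ⟨Or.inr h1, h2⟩)
    simp only [Option.getD_some]
    omega

-- ===== VERDICT (by name: the statement is the Claim_ definition above) =====
theorem SplitSumClosedSizeHalf2_spec : Claim_equal_SplitSumClosedSizeHalf2 := by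
  intro arr _ hpre
  unfold Spec_SplitSumClosedSizeHalf2 SplitSumClosedSizeHalf2 SplitSumClosedSizeHalf2_alt
  have hsum : 0 ≤ arr.sum := List.sum_nonneg hpre
  have hfd : ∀ a : Int, PySem.Int.floordiv a 2 = a / 2 := fun a =>
    PySem.Int.floordiv_eq_ediv_of_pos (by norm_num)
  have hmod : PySem.Int.mod ((arr.length : Int)) 2 = (arr.length : Int) % 2 :=
    PySem.Int.mod_eq_emod_of_pos (by norm_num)
  simp only [hfd, hmod]
  have hrest : 0 ≤ arr.sum / 2 := by omega
  have hN0 : (0:Int) ≤ (arr.length : Int) := Int.natCast_nonneg _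
  -- A-side table invariant
  have hrep : RepA (arr.sum / 2) (-((-(arr.length : Int)) / 2)) arr
      ((PySem.List.pyRange ((arr.length : Int) - 1) (-1) (-1)).foldl
        (fun dpn1 n =>
          pvARow (arr.sum / 2) (-((-(arr.length : Int)) / 2)) (PySem.List.pyGetD arr n 0) dpn1)
        ((PySem.List.pyRange 0 (arr.sum / 2 + 1) 1).map (fun _ =>
          PySem.List.pySetD (List.replicate ((-((-(arr.length : Int)) / 2) + 1)).toNat (-1)) 0 0))) := by
    have h0 := repA_base (rest := arr.sum / 2) (M := -((-(arr.length : Int)) / 2)) (by omega)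
    exact repA_fold arr hpre arr.length _ le_rfl (by rw [List.drop_length]; exact h0)
  -- B-side reachability invariant
  have hinv : InvB (arr.sum / 2) (((arr.length : Int) + 1) / 2) arr
      (arr.foldl (pvBStep (arr.sum / 2) (((arr.length : Int) + 1) / 2))
        ([PySem.Set.ofList [0]] ++
          (PySem.List.pyRange 0 (((arr.length : Int) + 1) / 2) 1).map
            (fun _ => (PySem.Set.empty : PySem.Set Int)))) := by
    have := invB_fold arr [] _ hpre
      (invB_init (rest := arr.sum / 2) (M := ((arr.length : Int) + 1) / 2) hrest)
    rwa [List.nil_append] at this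
  by_cases hpar : (arr.length : Int) % 2 = 0
  · rw [if_pos hpar, if_pos hpar]
    rw [hrep _ _ hrest le_rfl (by omega) (by omega)]
    have hB := maxSet_eq_bestA2 (k1 := (arr.length : Int) / 2) (k2 := (arr.length : Int) / 2)
      hpre hrest _
      (fun s => by rw [hinv ((arr.length : Int) / 2) (by omega) (by omega) s]; tauto)
    rw [hB, max_self]
  · rw [if_neg hpar, if_neg hpar]
    rw [hrep _ _ hrest le_rfl (by omega) (by omega),
        hrep _ _ hrest le_rfl (by omega) (by omega)]
    have hB := maxSet_eq_bestA2 (k1 := (arr.length : Int) / 2) (k2 := (arr.length : Int) / 2 + 1)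
      hpre hrest
      (PySem.Set.union
        (PySem.List.pyGetD
          (arr.foldl (pvBStep (arr.sum / 2) (((arr.length : Int) + 1) / 2))
            ([PySem.Set.ofList [0]] ++
              (PySem.List.pyRange 0 (((arr.length : Int) + 1) / 2) 1).map
                (fun _ => (PySem.Set.empty : PySem.Set Int))))
          ((arr.length : Int) / 2) [])
        (PySem.List.pyGetD
          (arr.foldl (pvBStep (arr.sum / 2) (((arr.length : Int) + 1) / 2))
            ([PySem.Set.ofList [0]] ++
              (PySem.List.pyRange 0 (((arr.length : Int) + 1) / 2) 1).map
                (fun _ => (PySem.Set.empty : PySem.Set Int))))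
          ((arr.length : Int) / 2 + 1) []))
      (fun s => by
        rw [PySem.Set.mem_union, hinv ((arr.length : Int) / 2) (by omega) (by omega) s,
          hinv ((arr.length : Int) / 2 + 1) (by omega) (by omega) s]
        tauto)
    rw [hB]
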